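-- pv_equiv track=rewrite | github.com/Intiserahmed/GlimpseUI | clients/android_client.py | find_in_tree
-- ===== SOURCE A (Python) =====
-- def find_in_tree(prompt: str, elements: list) -> dict | None:
--     """Fuzzy-find element by natural language prompt."""
--     if not prompt or not elements:
--         return None
--     p = prompt.lower().strip()
--
--     # Exact match
--     for el in elements:
--         if p in (el.get("label", "").lower(), el.get("identifier", "").lower()):
--             return el
--     # Prompt contained in label
--     for el in elements:
--         if p in el.get("label", "").lower() or p in el.get("identifier", "").lower():
--             return el
--     # Label contained in prompt (handles "Login button" → find "Login")
--     for el in elements: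
--         lbl = el.get("label", "").lower()
--         idn = el.get("identifier", "").lower()
--         if (lbl and lbl in p) or (idn and idn in p):
--             return el
--     return None
-- ===== SOURCE B (Python) =====
-- def find_in_tree(prompt: str, elements: list) -> dict | None:
--     """Fuzzy-find element by natural language prompt (single pass)."""
--     if not prompt or not elements:
--         return None
--     p = prompt.lower().strip()
--     best_tier = 4
--     best = None
--     for el in elements:
--         lbl = el.get("label", "").lower()
--         idn = el.get("identifier", "").lower()
--         if p == lbl or p == idn:
--             return el  # tier 1: exact match wins immediately
--         if p in lbl or p in idn:
--             tier = 2
--         elif (lbl and lbl in p) or (idn and idn in p):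
--             tier = 3
--         else:
--             continue
--         if tier < best_tier:
--             best_tier = tier
--             best = el
--     return best
-- ===== Notes on version B (the rewrite author's own statement) =====
-- stated objective: alternative
-- what changed: Replaces A's three sequential full scans with a single traversal that returns immediately on an exact (tier-1) match and otherwise remembers the first tier-2 and, failing that, first tier-3 candidate.
import Mathlib
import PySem

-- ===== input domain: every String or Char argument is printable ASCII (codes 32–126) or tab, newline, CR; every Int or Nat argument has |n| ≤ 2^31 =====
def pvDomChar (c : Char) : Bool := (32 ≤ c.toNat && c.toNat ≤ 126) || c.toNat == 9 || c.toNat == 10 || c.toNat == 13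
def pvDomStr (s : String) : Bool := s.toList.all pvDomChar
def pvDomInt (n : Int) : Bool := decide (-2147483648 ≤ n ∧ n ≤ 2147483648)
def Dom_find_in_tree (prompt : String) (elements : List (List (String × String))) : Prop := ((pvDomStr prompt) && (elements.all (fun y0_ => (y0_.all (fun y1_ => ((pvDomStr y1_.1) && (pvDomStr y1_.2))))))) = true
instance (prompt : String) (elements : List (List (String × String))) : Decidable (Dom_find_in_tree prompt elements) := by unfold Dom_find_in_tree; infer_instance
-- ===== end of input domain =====

-- B replaces A's three sequential scans with a single pass tracking the best tier seen (alternative decomposition, same cost).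


-- shared primitive: el.get(k, "").lower()  (both Pythons compute exactly this)
def elLow (el : List (String × String)) (k : String) : String :=
  PySem.Str.lower ((PySem.Dict.mk el).getD k "")

-- the three boolean conditions both Pythons test, verbatim
def condE (p : String) (el : List (String × String)) : Bool :=
  p == elLow el "label" || p == elLow el "identifier"
def condC (p : String) (el : List (String × String)) : Bool :=
  PySem.Str.isIn p (elLow el "label") || PySem.Str.isIn p (elLow el "identifier")
def condS (p : String) (el : List (String × String)) : Bool :=
  (!(elLow el "label" == "") && PySem.Str.isIn (elLow el "label") p) ||
  (!(elLow el "identifier" == "") && PySem.Str.isIn (elLow el "identifier") p)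

-- ===== PORT A =====  (three sequential scans)
def find_in_tree (prompt : String) (elements : List (List (String × String))) : Option (List (String × String)) :=
  if prompt = "" ∨ elements = [] then none
  else
    let p := PySem.Str.strip (PySem.Str.lower prompt)
    match elements.find? (condE p) with
    | some el => some el
    | none =>
      match elements.find? (condC p) with
      | some el => some el
      | none => elements.find? (condS p)

-- ===== PORT B =====  (single pass, best-tier accumulator)
def scanB (p : String) (bestTier : Nat) (best : Option (List (String × String))) :
    List (List (String × String)) → Option (List (String × String))
  | [] => best
  | el :: rest =>
    if condE p el then some el
    else if condC p el then
      (if 2 < bestTier then scanB p 2 (some el) rest else scanB p bestTier best rest)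
    else if condS p el then
      (if 3 < bestTier then scanB p 3 (some el) rest else scanB p bestTier best rest)
    else scanB p bestTier best rest

def find_in_tree_alt (prompt : String) (elements : List (List (String × String))) : Option (List (String × String)) :=
  if prompt = "" ∨ elements = [] then none
  else scanB (PySem.Str.strip (PySem.Str.lower prompt)) 4 none elements

-- ===== PRECONDITION & SPEC =====
def Spec_find_in_tree (prompt : String) (elements : List (List (String × String))) (out : Option (List (String × String))) : Prop := out = find_in_tree_alt prompt elements
instance (prompt : String) (elements : List (List (String × String))) (out : Option (List (String × String))) : Decidable (Spec_find_in_tree prompt elements out) := by unfold Spec_find_in_tree; infer_instance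

-- ===== CLAIM (what is proved, stated in full; the proofs are below) =====
def Claim_equal_find_in_tree : Prop := ∀ (prompt : String) (elements : List (List (String × String))), Dom_find_in_tree prompt elements → Spec_find_in_tree prompt elements (find_in_tree prompt elements)

-- ===== LEMMAS AND PROOFS =====

-- If any exact match exists, the single pass returns the first one, regardless of state.
theorem scan_exact (p : String) (bt : Nat) (best : Option (List (String × String)))
    (l : List (List (String × String))) (el : List (String × String))
    (h : l.find? (condE p) = some el) : scanB p bt best l = some el := by
  induction l generalizing bt best with
  | nil => simp at h
  | cons a rest ih =>
    simp only [List.find?] at h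
    by_cases hE : condE p a
    · simp only [hE] at h
      cases h
      simp [scanB, hE]
    · simp only [hE] at h
      simp only [scanB, hE, Bool.false_eq_true, if_false]
      split_ifs <;> exact ih _ _ h

-- No exact match: with bestTier = 2 the state is final.
theorem scan2 (p : String) (b : List (String × String)) (l : List (List (String × String)))
    (h : ∀ x ∈ l, condE p x = false) : scanB p 2 (some b) l = some b := by
  induction l with
  | nil => rfl
  | cons a rest ih =>
    have hE : condE p a = false := h a (by simp)
    have hr : ∀ x ∈ rest, condE p x = false := fun x hx => h x (by simp [hx])
    simp [scanB, hE, ih hr]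

-- No exact match: with bestTier = 3 a later tier-2 element supersedes the stored candidate.
theorem scan3 (p : String) (b : List (String × String)) (l : List (List (String × String)))
    (h : ∀ x ∈ l, condE p x = false) :
    scanB p 3 (some b) l =
      (match l.find? (condC p) with | some x => some x | none => some b) := by
  induction l with
  | nil => rfl
  | cons a rest ih =>
    have hE : condE p a = false := h a (by simp)
    have hr : ∀ x ∈ rest, condE p x = false := fun x hx => h x (by simp [hx])
    by_cases hC : condC p a
    · simp [scanB, hE, hC, List.find?, scan2 p a rest hr]
    · by_cases hS : condS p a
      · simp [scanB, hE, hC, hS, List.find?, ih hr]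
      · simp [scanB, hE, hC, hS, List.find?, ih hr]

-- No exact match: from the initial state the single pass yields first tier-2, else first tier-3.
theorem scan4 (p : String) (l : List (List (String × String)))
    (h : ∀ x ∈ l, condE p x = false) :
    scanB p 4 none l =
      (match l.find? (condC p) with | some x => some x | none => l.find? (condS p)) := by
  induction l with
  | nil => rfl
  | cons a rest ih =>
    have hE : condE p a = false := h a (by simp)
    have hr : ∀ x ∈ rest, condE p x = false := fun x hx => h x (by simp [hx])
    by_cases hC : condC p a
    · simp [scanB, hE, hC, List.find?, scan2 p a rest hr]
    · by_cases hS : condS p a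
      · simp [scanB, hE, hC, hS, List.find?, scan3 p a rest hr]
      · simp [scanB, hE, hC, hS, List.find?, ih hr]

-- ===== VERDICT (by name: the statement is the Claim_ definition above) =====
theorem find_in_tree_spec : Claim_equal_find_in_tree := by
  intro prompt elements _
  unfold Spec_find_in_tree find_in_tree find_in_tree_alt
  by_cases h0 : prompt = "" ∨ elements = []
  · simp [h0]
  · simp only [h0, if_false]
    set p := PySem.Str.strip (PySem.Str.lower prompt)
    cases hE : elements.find? (condE p) with
    | some el => rw [scan_exact p 4 none elements el hE]
    | none => rw [scan4 p elements (fun x hx => by simpa using List.find?_eq_none.mp hE x hx)]
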